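-- pv_equiv track=rewrite | github.com/Ka-raS/School-Code | Nam 2 Ky 2 - Lap trinh Python/238. BIẾN ĐỔI VỀ DÃY BẰNG NHAU.py | convert_equal
-- ===== SOURCE A (Python) =====
-- from typing import List, Tuple
--
-- def convert_equal(numbers: List[int]) -> Tuple[int, int]:
--     convert_step = float('inf')
--     target_number = None
--
--     for target in numbers:
--         step = 0
--         for number in numbers:
--             step += abs(target - number)
--
--         if convert_step > step:
--             convert_step = step
--             target_number = target
--
--     return convert_step, target_number
-- ===== SOURCE B (Python) =====
-- from typing import List, Tuple
--
-- def convert_equal(numbers: List[int]) -> Tuple[int, int]: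
--     # Sort once; walk the sorted values computing each candidate's total move
--     # cost incrementally (piecewise-linear cost function), then pick the first
--     # minimum in original order by dictionary lookup.  O(n log n).
--     s = sorted(numbers)
--     n = len(s)
--     c = sum(s) - n * s[0]
--     cost = {s[0]: c}
--     prev = s[0]
--     for j, cur in enumerate(s[1:], 1):
--         c += (cur - prev) * (2 * j - n)
--         cost[cur] = c
--         prev = cur
--     best_cost, best = cost[numbers[0]], numbers[0]
--     for t in numbers[1:]:
--         if cost[t] < best_cost:
--             best_cost, best = cost[t], t
--     return best_cost, best
-- ===== Notes on version B (the rewrite author's own statement) =====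
-- stated objective: faster
-- what changed: A recomputes the full absolute-difference sum for every candidate target (nested loops); B sorts once, computes every candidate's cost incrementally along the sorted list via the piecewise-linear cost recurrence, stores them in a dict, and then selects the first minimum in original order by lookup.
-- outside the precondition, e.g. on convert_equal([]): A returns (inf, None), B raises IndexError
import Mathlib
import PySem

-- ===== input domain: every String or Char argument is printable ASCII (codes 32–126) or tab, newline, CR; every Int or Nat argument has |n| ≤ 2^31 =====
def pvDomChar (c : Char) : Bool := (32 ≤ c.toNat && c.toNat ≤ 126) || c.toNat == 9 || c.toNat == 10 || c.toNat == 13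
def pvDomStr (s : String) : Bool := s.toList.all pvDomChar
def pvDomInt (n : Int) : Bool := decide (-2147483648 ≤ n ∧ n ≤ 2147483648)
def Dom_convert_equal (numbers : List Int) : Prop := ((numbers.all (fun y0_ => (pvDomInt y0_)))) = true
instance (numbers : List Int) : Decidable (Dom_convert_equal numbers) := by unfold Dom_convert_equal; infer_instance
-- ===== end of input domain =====

-- B replaces A's quadratic nested loops by sort + incremental cost recurrence + dict lookup (faster, O(n log n)).

-- ===== PORT A =====
-- for target in numbers: step = Σ |target - number|; keep the first strict minimum.
-- float('inf') / None initial state is modelled by an Option accumulator (first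
-- iteration always updates, exactly as 'inf > step' is always true in Python).
def convert_equal (numbers : List Int) : Int × Int :=
  let r := numbers.foldl
    (fun acc target =>
      let step := numbers.foldl (fun a number => a + |target - number|) 0
      match acc with
      | none => some (step, target)
      | some (cs, tn) => if cs > step then some (step, target) else some (cs, tn))
    (none : Option (Int × Int))
  match r with
  | none => (0, 0)  -- numbers = []: Python A returns (inf, None), not an Int × Int; excluded by Pre_
  | some p => p

-- ===== PORT B =====
-- for j, cur in enumerate(s[1:], 1): c += (cur - prev) * (2*j - n); cost[cur] = c; prev = cur
def ceBuild (n : Int) : List (Int × Int) → Int → PySem.Dict Int Int → Int → PySem.Dict Int Int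
  | [], _c, d, _prev => d
  | (j, cur) :: rest, c, d, prev =>
    let c' := c + (cur - prev) * (2 * j - n)
    ceBuild n rest c' (d.insert cur c') cur

-- for t in numbers[1:]: if cost[t] < best_cost: best_cost, best = cost[t], t
-- cost[t] is looked up with getD 0: every t ∈ numbers is a key of cost, so no KeyError arises.
def ceSelect (cost : PySem.Dict Int Int) : List Int → Int → Int → Int × Int
  | [], bc, b => (bc, b)
  | t :: ts, bc, b =>
    let ct := cost.getD t 0
    if ct < bc then ceSelect cost ts ct t else ceSelect cost ts bc b

def convert_equal_alt (numbers : List Int) : Int × Int :=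
  let s := PySem.List.sorted numbers (fun x => x) false
  let n : Int := (s.length : Int)
  match numbers, s with
  | [], _ => (0, 0)        -- Python B raises IndexError on s[0]; excluded by Pre_
  | _, [] => (0, 0)        -- unreachable: s = [] iff numbers = []
  | t0 :: ts, s0 :: stail =>
    let c0 := (s0 :: stail).foldl (· + ·) 0 - n * s0          -- sum(s) - n * s[0]
    let cost := ceBuild n (PySem.List.enumerate stail 1) c0
                  (PySem.Dict.empty.insert s0 c0) s0
    ceSelect cost ts (cost.getD t0 0) t0

-- ===== PRECONDITION & SPEC =====
-- Pre_ excludes only the empty list, on which A returns (inf, None) — a float and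
-- a None, not values of the declared Tuple[int, int] type — and B raises IndexError.
def Pre_convert_equal (numbers : List Int) : Prop := numbers ≠ []
instance (numbers : List Int) : Decidable (Pre_convert_equal numbers) := by
  unfold Pre_convert_equal; infer_instance
def pvWitness_convert_equal : List Int := [3, 1, 2, 2]
def Spec_convert_equal (numbers : List Int) (out : Int × Int) : Prop := out = convert_equal_alt numbers
instance (numbers : List Int) (out : Int × Int) : Decidable (Spec_convert_equal numbers out) := by unfold Spec_convert_equal; infer_instance

-- ===== CLAIM (what is proved, stated in full; the proofs are below) =====
def Claim_equal_convert_equal : Prop := ∀ (numbers : List Int), Dom_convert_equal numbers → Pre_convert_equal numbers → Spec_convert_equal numbers (convert_equal numbers)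

-- ===== LEMMAS AND PROOFS =====

-- total cost of moving every element of l to t
def absSum (t : Int) (l : List Int) : Int := (l.map (fun x => |t - x|)).sum

theorem absSum_perm (t : Int) {l₁ l₂ : List Int} (h : l₁.Perm l₂) :
    absSum t l₁ = absSum t l₂ :=
  (h.map _).sum_eq

theorem absSum_of_ge (t : Int) (l : List Int) (h : ∀ x ∈ l, x ≤ t) :
    absSum t l = (l.length : Int) * t - l.sum := by
  induction l with
  | nil => simp [absSum]
  | cons x xs ih =>
    have hx : x ≤ t := h x (List.mem_cons_self ..)
    have habs : |t - x| = t - x := abs_of_nonneg (by omega)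
    have ih' := ih (fun y hy => h y (List.mem_cons_of_mem _ hy))
    simp only [absSum, List.map_cons, List.sum_cons, List.length_cons] at *
    rw [habs, ih']; push_cast; ring

theorem absSum_of_le (t : Int) (l : List Int) (h : ∀ x ∈ l, t ≤ x) :
    absSum t l = l.sum - (l.length : Int) * t := by
  induction l with
  | nil => simp [absSum]
  | cons x xs ih =>
    have hx : t ≤ x := h x (List.mem_cons_self ..)
    have habs : |t - x| = x - t := by rw [abs_sub_comm]; exact abs_of_nonneg (by omega)
    have ih' := ih (fun y hy => h y (List.mem_cons_of_mem _ hy))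
    simp only [absSum, List.map_cons, List.sum_cons, List.length_cons] at *
    rw [habs, ih']; push_cast; ring

theorem absSum_append (t : Int) (l₁ l₂ : List Int) :
    absSum t (l₁ ++ l₂) = absSum t l₁ + absSum t l₂ := by
  simp [absSum]

-- the incremental step of B: moving the target from prev to the next sorted value cur
theorem absSum_step (p rest : List Int) (prev cur : Int)
    (hpair : (p ++ prev :: cur :: rest).Pairwise (· ≤ ·)) :
    absSum cur (p ++ prev :: cur :: rest) =
      absSum prev (p ++ prev :: cur :: rest) +
        (cur - prev) * (2 * ((p.length : Int) + 1) - ((p ++ prev :: cur :: rest).length : Int)) := by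
  rw [List.pairwise_append] at hpair
  obtain ⟨-, htail, hcross⟩ := hpair
  rw [List.pairwise_cons] at htail
  obtain ⟨hprev, htail2⟩ := htail
  rw [List.pairwise_cons] at htail2
  obtain ⟨hcur, -⟩ := htail2
  have hpc : prev ≤ cur := hprev cur (List.mem_cons_self ..)
  have hp_prev : ∀ x ∈ p, x ≤ prev := fun x hx => hcross x hx prev (List.mem_cons_self ..)
  have hp_cur : ∀ x ∈ p, x ≤ cur := fun x hx => le_trans (hp_prev x hx) hpc
  have hr_cur : ∀ x ∈ rest, cur ≤ x := hcur
  have hr_prev : ∀ x ∈ rest, prev ≤ x := fun x hx => le_trans hpc (hr_cur x hx)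
  have e1 : absSum cur (prev :: cur :: rest) = (cur - prev) + (rest.sum - (rest.length : Int) * cur) := by
    have h1 : |cur - prev| = cur - prev := abs_of_nonneg (by omega)
    have h2 : (rest.map (fun x => |cur - x|)).sum = rest.sum - (rest.length : Int) * cur :=
      absSum_of_le cur rest hr_cur
    simp only [absSum, List.map_cons, List.sum_cons]
    rw [h1, sub_self, abs_zero, h2]
    ring
  have e2 : absSum prev (prev :: cur :: rest) = (cur - prev) + (rest.sum - (rest.length : Int) * prev) := by
    have h1 : |prev - cur| = cur - prev := by rw [abs_sub_comm]; exact abs_of_nonneg (by omega)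
    have h2 : (rest.map (fun x => |prev - x|)).sum = rest.sum - (rest.length : Int) * prev :=
      absSum_of_le prev rest hr_prev
    simp only [absSum, List.map_cons, List.sum_cons]
    rw [sub_self, abs_zero, h1, h2]
    ring
  rw [absSum_append, absSum_append, e1, e2,
      absSum_of_ge cur p hp_cur, absSum_of_ge prev p hp_prev]
  simp [List.length_append]
  ring

-- the dict built by B maps every element of the sorted list s to its cost absSum · s
theorem ceBuild_getD (n : Int) (s : List Int) (hpair : s.Pairwise (· ≤ ·))
    (hn : n = (s.length : Int)) :
    ∀ (l p : List Int) (prev : Int) (d : PySem.Dict Int Int),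
      s = p ++ prev :: l →
      (∀ t ∈ p ++ [prev], d.getD t 0 = absSum t s) →
      ∀ t ∈ s,
        (ceBuild n (PySem.List.enumerate l ((p.length : Int) + 1)) (absSum prev s) d prev).getD t 0
          = absSum t s := by
  intro l
  induction l with
  | nil =>
    intro p prev d hs hd t ht
    simp only [PySem.List.enumerate_nil, ceBuild]
    exact hd t (by rw [hs] at ht; simpa using ht)
  | cons cur rest ih =>
    intro p prev d hs hd t ht
    rw [PySem.List.enumerate_cons]
    simp only [ceBuild]
    have hstep : absSum prev s + (cur - prev) * (2 * ((p.length : Int) + 1) - n) = absSum cur s := by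
      rw [hs] at hpair ⊢
      rw [hn, hs, absSum_step p rest prev cur hpair]
    rw [hstep]
    have hs' : s = (p ++ [prev]) ++ cur :: rest := by simpa using hs
    have hd' : ∀ u ∈ (p ++ [prev]) ++ [cur], (d.insert cur (absSum cur s)).getD u 0 = absSum u s := by
      intro u hu
      by_cases hcu : u = cur
      · subst hcu; simp [PySem.Dict.getD_insert_self]
      · rw [PySem.Dict.getD_insert, if_neg hcu]
        apply hd
        rcases List.mem_append.mp hu with h | h
        · exact h
        · simp at h; exact absurd h hcu
    have hlen : ((p ++ [prev]).length : Int) + 1 = (p.length : Int) + 1 + 1 := by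
      simp
    have hmain := ih (p ++ [prev]) cur (d.insert cur (absSum cur s)) hs' hd' t ht
    rw [hlen] at hmain
    exact hmain

-- A's selection fold equals B's selection loop once costs agree
theorem selA_eq (numbers : List Int) (cost : PySem.Dict Int Int) :
    ∀ (ts : List Int) (bc b : Int),
      (∀ t ∈ ts, numbers.foldl (fun a x => a + |t - x|) 0 = cost.getD t 0) →
      ts.foldl
        (fun acc target =>
          let step := numbers.foldl (fun a number => a + |target - number|) 0
          match acc with
          | none => some (step, target)
          | some (cs, tn) => if cs > step then some (step, target) else some (cs, tn))
        (some (bc, b)) = some (ceSelect cost ts bc b) := by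
  intro ts
  induction ts with
  | nil => intro bc b _; simp [ceSelect]
  | cons t rest ih =>
    intro bc b h
    have ht := h t (List.mem_cons_self ..)
    simp only [List.foldl_cons, ceSelect, ht, gt_iff_lt]
    by_cases hlt : cost.getD t 0 < bc
    · simp only [if_pos hlt]
      exact ih _ _ (fun u hu => h u (List.mem_cons_of_mem _ hu))
    · simp only [if_neg hlt]
      exact ih _ _ (fun u hu => h u (List.mem_cons_of_mem _ hu))

theorem inner_eq_absSum (t : Int) (l : List Int) :
    l.foldl (fun a x => a + |t - x|) 0 = absSum t l := by
  rw [PySem.List.foldl_add (g := fun x => |t - x|)]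
  simp [absSum]

-- A's whole fold (from the float('inf')/None initial state) equals B's selection
theorem foldA_cons (numbers : List Int) (cost : PySem.Dict Int Int) (t0 : Int) (ts : List Int)
    (h0 : numbers.foldl (fun a x => a + |t0 - x|) 0 = cost.getD t0 0)
    (h : ∀ t ∈ ts, numbers.foldl (fun a x => a + |t - x|) 0 = cost.getD t 0) :
    (t0 :: ts).foldl
      (fun acc target =>
        let step := numbers.foldl (fun a number => a + |target - number|) 0
        match acc with
        | none => some (step, target)
        | some (cs, tn) => if cs > step then some (step, target) else some (cs, tn))
      (none : Option (Int × Int)) = some (ceSelect cost ts (cost.getD t0 0) t0) := by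
  rw [List.foldl_cons]
  show ts.foldl _ (some (numbers.foldl (fun a x => a + |t0 - x|) 0, t0)) = _
  rw [h0]
  exact selA_eq numbers cost ts _ _ h

-- ===== VERDICT (by name: the statement is the Claim_ definition above) =====
theorem convert_equal_spec : Claim_equal_convert_equal := by
  intro numbers _hdom hpre
  unfold Spec_convert_equal
  obtain ⟨t0, ts, rfl⟩ : ∃ t0 ts, numbers = t0 :: ts := by
    cases numbers with
    | nil => exact absurd rfl hpre
    | cons a l => exact ⟨a, l, rfl⟩
  obtain ⟨s0, stail, hs⟩ : ∃ s0 stail,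
      PySem.List.sorted (t0 :: ts) (fun x => x) false = s0 :: stail := by
    cases h : PySem.List.sorted (t0 :: ts) (fun x => x) false with
    | nil => exact absurd ((PySem.List.sorted_eq_nil_iff _ _ _).mp h) hpre
    | cons a l => exact ⟨a, l, rfl⟩
  have hperm : (s0 :: stail).Perm (t0 :: ts) :=
    hs ▸ PySem.List.sorted_perm (t0 :: ts) (fun x => x) false
  have hpair : (s0 :: stail).Pairwise (· ≤ ·) := by
    have := PySem.List.sorted_pairwise (xs := t0 :: ts) (key := fun x => x)
    rw [hs] at this
    exact this
  have hhead : ∀ x ∈ s0 :: stail, s0 ≤ x := by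
    rw [List.pairwise_cons] at hpair
    intro x hx
    rcases List.mem_cons.mp hx with rfl | hx'
    · exact le_refl x
    · exact hpair.1 x hx'
  have hsum : (s0 :: stail).foldl (· + ·) 0 = (s0 :: stail).sum := by
    rw [PySem.List.foldl_add (g := fun x => x)]
    simp
  have hc0 : (s0 :: stail).foldl (· + ·) 0 - ((s0 :: stail).length : Int) * s0
      = absSum s0 (s0 :: stail) := by
    rw [hsum, absSum_of_le s0 (s0 :: stail) hhead]
  have hcost := ceBuild_getD (((s0 :: stail).length : Int)) (s0 :: stail) hpair rfl stail [] s0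
      (PySem.Dict.empty.insert s0 (absSum s0 (s0 :: stail))) rfl
      (by intro t ht
          simp only [List.nil_append, List.mem_singleton] at ht
          subst ht
          exact PySem.Dict.getD_insert_self ..)
  have hcost' : ∀ t ∈ s0 :: stail,
      (ceBuild (((s0 :: stail).length : Int)) (PySem.List.enumerate stail 1)
        (absSum s0 (s0 :: stail)) (PySem.Dict.empty.insert s0 (absSum s0 (s0 :: stail))) s0).getD t 0
      = absSum t (s0 :: stail) := by
    have h1 : ((([] : List Int).length : Int) + 1) = (1 : Int) := by simp
    rw [h1] at hcost
    exact hcost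
  set cost := ceBuild (((s0 :: stail).length : Int)) (PySem.List.enumerate stail 1)
      (absSum s0 (s0 :: stail)) (PySem.Dict.empty.insert s0 (absSum s0 (s0 :: stail))) s0 with hcostdef
  have hlookup : ∀ t ∈ t0 :: ts, (t0 :: ts).foldl (fun a x => a + |t - x|) 0 = cost.getD t 0 := by
    intro t ht
    rw [inner_eq_absSum, absSum_perm t hperm.symm, hcost' t (hperm.mem_iff.mpr ht)]
  have halt : convert_equal_alt (t0 :: ts) = ceSelect cost ts (cost.getD t0 0) t0 := by
    rw [convert_equal_alt.eq_def]
    simp only []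
    rw [hs]
    simp only [hc0]
    rfl
  have hA : convert_equal (t0 :: ts) = ceSelect cost ts (cost.getD t0 0) t0 := by
    unfold convert_equal
    rw [foldA_cons (t0 :: ts) cost t0 ts
        (hlookup t0 (List.mem_cons_self ..))
        (fun u hu => hlookup u (List.mem_cons_of_mem _ hu))]
  rw [hA, halt]
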